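-- pv_equiv track=rewrite | github.com/wangxj12/LumiRAG-IR | rlhf/verl/recipe/dapo/dapo_ray_trainer.py | increase_to_min_multiple
-- ===== SOURCE A (Python) =====
-- def increase_to_min_multiple(lst, n):
--     if n <= 0:
--         raise ValueError("n must be a positive integer")
--     original_length = len(lst)
--     if original_length == 0:
--         return lst.copy()  # 返回空列表的副本
--
--     min_multiple = (original_length + n - 1) // n  # 计算最小倍数
--     target_length = min_multiple * n
--     num_to_add = target_length - original_length
--
--     if num_to_add == 0:
--         return lst.copy()  # 如果已经是n的倍数，直接返回副本
--     elements_to_add = [lst[i % original_length] for i in range(num_to_add)]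
--     return elements_to_add
-- ===== SOURCE B (Python) =====
-- def increase_to_min_multiple(lst, n):
--     if n <= 0:
--         raise ValueError("n must be a positive integer")
--     if not lst:
--         return lst.copy()
--     num_to_add = -len(lst) % n
--     if num_to_add == 0:
--         return lst.copy()
--     reps = num_to_add // len(lst) + 1
--     return (lst * reps)[:num_to_add]
-- ===== Notes on version B (the rewrite author's own statement) =====
-- stated objective: simpler
-- what changed: B replaces the per-index modulo comprehension with computing num_to_add as -len(lst) % n directly, tiling the list with list multiplication and truncating by slicing.
import Mathlib
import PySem

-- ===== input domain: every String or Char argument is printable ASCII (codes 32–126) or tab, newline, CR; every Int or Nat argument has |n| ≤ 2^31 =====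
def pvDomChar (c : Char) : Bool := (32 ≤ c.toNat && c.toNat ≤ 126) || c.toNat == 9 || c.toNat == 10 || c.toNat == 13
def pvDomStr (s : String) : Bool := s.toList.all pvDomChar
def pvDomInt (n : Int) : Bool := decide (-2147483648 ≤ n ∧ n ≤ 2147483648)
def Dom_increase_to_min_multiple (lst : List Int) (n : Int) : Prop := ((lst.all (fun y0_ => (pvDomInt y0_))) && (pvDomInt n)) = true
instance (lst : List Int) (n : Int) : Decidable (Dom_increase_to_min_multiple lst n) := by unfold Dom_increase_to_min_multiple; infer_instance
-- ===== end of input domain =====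

-- B computes the padding by tiling the list and slicing instead of A's per-index modulo comprehension (objective: simpler).

-- ===== PORT A =====
def increase_to_min_multiple (lst : List Int) (n : Int) : List Int :=
  if n ≤ 0 then []  -- Python raises ValueError here; excluded by Pre_
  else
    let originalLength : Int := lst.length
    if originalLength = 0 then lst
    else
      let minMultiple := PySem.Int.floordiv (originalLength + n - 1) n
      let targetLength := minMultiple * n
      let numToAdd := targetLength - originalLength
      if numToAdd = 0 then lst
      else
        (PySem.List.pyRange 0 numToAdd 1).map
          (fun i => PySem.List.pyGetD lst (PySem.Int.mod i originalLength) 0)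
        -- index i % original_length is always in range (0 ≤ i, originalLength > 0), so pyGetD's default is never used

-- ===== PORT B =====
def increase_to_min_multiple_alt (lst : List Int) (n : Int) : List Int :=
  if n ≤ 0 then []  -- Python raises ValueError here; excluded by Pre_
  else if lst = [] then lst
  else
    let numToAdd := PySem.Int.mod (-(lst.length : Int)) n
    if numToAdd = 0 then lst
    else
      let reps := PySem.Int.floordiv numToAdd (lst.length : Int) + 1
      -- `lst * reps` (Python list repetition) ported step for step as flatten of replicate
      PySem.List.slice ((List.replicate reps.toNat lst).flatten) none (some numToAdd)

-- ===== PRECONDITION & SPEC =====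
-- Pre_ excludes exactly n ≤ 0, where Python A raises ValueError.
def Pre_increase_to_min_multiple (lst : List Int) (n : Int) : Prop := 0 < n
instance (lst : List Int) (n : Int) : Decidable (Pre_increase_to_min_multiple lst n) := by unfold Pre_increase_to_min_multiple; infer_instance
def pvWitness_increase_to_min_multiple : List Int × Int := ([1, 2, 3], 5)

def Spec_increase_to_min_multiple (lst : List Int) (n : Int) (out : List Int) : Prop := out = increase_to_min_multiple_alt lst n
instance (lst : List Int) (n : Int) (out : List Int) : Decidable (Spec_increase_to_min_multiple lst n out) := by unfold Spec_increase_to_min_multiple; infer_instance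

-- ===== CLAIM (what is proved, stated in full; the proofs are below) =====
def Claim_equal_increase_to_min_multiple : Prop := ∀ (lst : List Int) (n : Int), Dom_increase_to_min_multiple lst n → Pre_increase_to_min_multiple lst n → Spec_increase_to_min_multiple lst n (increase_to_min_multiple lst n)

-- ===== LEMMAS AND PROOFS =====

theorem numToAdd_eq (L n : Int) (hn : 0 < n) :
    PySem.Int.floordiv (L + n - 1) n * n - L = PySem.Int.mod (-L) n := by
  rw [PySem.Int.floordiv_eq_ediv_of_pos hn, PySem.Int.mod_eq_emod_of_pos hn]
  set r := (-L) % n with hr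
  have h1 : 0 ≤ r := Int.emod_nonneg _ (by omega)
  have h2 : r < n := Int.emod_lt_of_pos _ hn
  have hLr : L + r = -((-L) / n) * n := by
    have := Int.emod_add_mul_ediv (-L) n
    rw [hr, neg_mul, mul_comm]; omega
  have : (L + n - 1) / n = -((-L) / n) := by
    have hrow : L + n - 1 = (n - 1 - r) + (-((-L) / n)) * n := by omega
    rw [hrow, Int.add_mul_ediv_right _ _ (by omega : n ≠ 0),
        Int.ediv_eq_zero_of_lt (by omega) (by omega)]
    omega
  rw [this]; omega

theorem flatten_replicate_getElem? (lst : List Int) (m k : Nat) (h : k < m * lst.length) :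
    ((List.replicate m lst).flatten)[k]? = lst[k % lst.length]? := by
  induction m generalizing k with
  | zero => simp at h
  | succ m ih =>
    rw [Nat.succ_mul] at h
    have hL : 0 < lst.length := by
      rcases Nat.eq_zero_or_pos lst.length with hl | hl
      · rw [hl, Nat.mul_zero] at h; omega
      · exact hl
    rw [List.replicate_succ, List.flatten_cons]
    by_cases hk : k < lst.length
    · rw [List.getElem?_append_left hk, Nat.mod_eq_of_lt hk]
    · rw [List.getElem?_append_right (by omega)]
      rw [ih (k - lst.length) (by omega)]
      congr 1
      conv_rhs => rw [show k = (k - lst.length) + lst.length by omega]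
      rw [Nat.add_mod_right]

theorem main_lists (lst : List Int) (r : Int) (hne : lst ≠ []) (h0 : 0 ≤ r) :
    (PySem.List.pyRange 0 r 1).map
        (fun i => PySem.List.pyGetD lst (PySem.Int.mod i (lst.length : Int)) 0)
      = PySem.List.slice ((List.replicate (PySem.Int.floordiv r (lst.length : Int) + 1).toNat lst).flatten) none (some r) := by
  have hL : 0 < lst.length := List.length_pos_iff.mpr hne
  have hLi : (0:Int) < (lst.length : Int) := by exact_mod_cast hL
  set reps : Int := PySem.Int.floordiv r (lst.length : Int) + 1 with hreps
  have hrlt : r < reps * (lst.length : Int) := by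
    rw [hreps, PySem.Int.floordiv_eq_ediv_of_pos hLi]
    have hm := Int.emod_add_mul_ediv r (lst.length : Int)
    have hmlt : r % (lst.length : Int) < (lst.length : Int) := Int.emod_lt_of_pos _ hLi
    have : (r / (lst.length : Int) + 1) * (lst.length : Int)
        = (lst.length : Int) * (r / (lst.length : Int)) + (lst.length : Int) := by ring
    omega
  have hreps0 : 0 ≤ reps := by
    rw [hreps, PySem.Int.floordiv_eq_ediv_of_pos hLi]
    have := Int.ediv_nonneg h0 (le_of_lt hLi)
    omega
  have hnat : r.toNat < reps.toNat * lst.length := by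
    have : ((reps.toNat * lst.length : Nat) : Int) = reps * (lst.length : Int) := by
      push_cast [Int.toNat_of_nonneg hreps0]; ring
    omega
  rw [PySem.List.slice_to _ h0, PySem.List.pyRange_one]
  simp only [Int.sub_zero, Int.zero_add]
  apply List.ext_getElem?
  intro j
  rw [List.getElem?_map, List.getElem?_map, List.getElem?_take]
  by_cases hj : j < r.toNat
  · rw [if_pos hj, List.getElem?_range hj, Option.map_some, Option.map_some,
        flatten_replicate_getElem? lst _ j (by omega)]
    have hmod : PySem.Int.mod ((j:Int)) (lst.length : Int) = ((j % lst.length : Nat) : Int) := by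
      rw [PySem.Int.mod_eq_emod_of_pos hLi]
      exact (Int.natCast_mod j lst.length).symm
    rw [hmod, PySem.List.pyGetD_natCast]
    have hjm : j % lst.length < lst.length := Nat.mod_lt _ hL
    rw [List.getElem?_eq_getElem hjm, List.getD_eq_getElem _ _ hjm]
  · rw [if_neg hj, List.getElem?_eq_none_iff.mpr (by simpa using hj)]
    rfl

theorem port_eq (lst : List Int) (n : Int) (hn : 0 < n) :
    increase_to_min_multiple lst n = increase_to_min_multiple_alt lst n := by
  unfold increase_to_min_multiple increase_to_min_multiple_alt
  rw [if_neg (by omega : ¬ n ≤ 0), if_neg (by omega : ¬ n ≤ 0)]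
  by_cases he : lst = []
  · simp [he]
  · have hL : 0 < lst.length := List.length_pos_iff.mpr he
    have hLi : (0:Int) < (lst.length : Int) := by exact_mod_cast hL
    rw [if_neg (by omega : ¬ (lst.length : Int) = 0), if_neg he]
    simp only [numToAdd_eq (lst.length : Int) n hn]
    by_cases hz : PySem.Int.mod (-(lst.length : Int)) n = 0
    · rw [if_pos hz, if_pos hz]
    · rw [if_neg hz, if_neg hz]
      exact main_lists lst _ he (PySem.Int.mod_nonneg _ hn)

-- ===== VERDICT (by name: the statement is the Claim_ definition above) =====
theorem increase_to_min_multiple_spec : Claim_equal_increase_to_min_multiple := by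
  intro lst n _ hpre
  exact port_eq lst n hpre
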